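-- pv_equiv track=rewrite | github.com/freindst/spacial-similarity-measure | shape_utility.py | z_order_curve
-- ===== SOURCE A (Python) =====
-- def z_order_curve(array, x_off: int, y_off: int, degree: int):
--     # following the pattern of Z-order curve, convert grid into a of string of 0s and 1s
--     if degree == 1:
--         if len(array) > y_off and len((array[y_off])) > x_off:
--             return str(array[y_off][x_off])
--         else:
--             return '0'
--     else:
--         quadrant = []
--         move = degree // 2
--         quadrant.append(z_order_curve(array, x_off, y_off, move))  # quadrant (0, 0)
--         quadrant.append(z_order_curve(array, x_off + move, y_off, move))  # quadrant (0, 1)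
--         quadrant.append(z_order_curve(array, x_off, y_off + move, move))  # quadrant (1, 0)
--         quadrant.append(z_order_curve(array, x_off + move, y_off + move, move))  # quadrant (1, 1)
--         return ''.join(quadrant)
-- ===== SOURCE B (Python) =====
-- def z_order_curve(array, x_off: int, y_off: int, degree: int):
--     # iterative breadth-first expansion: compute the per-level quadrant sizes,
--     # expand the list of leaf coordinates level by level, render once with join
--     def halvings(d):
--         return [] if d == 1 else [d // 2] + halvings(d // 2)
--     cells = [(x_off, y_off)]
--     for m in halvings(degree):
--         cells = [(x + dx, y + dy)
--                  for (x, y) in cells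
--                  for (dx, dy) in ((0, 0), (m, 0), (0, m), (m, m))]
--     return ''.join(str(array[y][x]) if len(array) > y and len(array[y]) > x else '0'
--                    for (x, y) in cells)
-- ===== Notes on version B (the rewrite author's own statement) =====
-- stated objective: alternative
-- what changed: The recursive four-quadrant descent is replaced by an iterative breadth-first pass: the per-level quadrant sizes are computed once, the list of leaf coordinates is expanded level by level, and the string is rendered with a single join; Pre_ conservatively excludes offsets far enough below the grid that a visited cell triggers Python's negative indexing or an IndexError.
-- outside the precondition, e.g. on z_order_curve([[1], [2, 3]], -2, 1, 1): A returns '2', B returns '2'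
import Mathlib
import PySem

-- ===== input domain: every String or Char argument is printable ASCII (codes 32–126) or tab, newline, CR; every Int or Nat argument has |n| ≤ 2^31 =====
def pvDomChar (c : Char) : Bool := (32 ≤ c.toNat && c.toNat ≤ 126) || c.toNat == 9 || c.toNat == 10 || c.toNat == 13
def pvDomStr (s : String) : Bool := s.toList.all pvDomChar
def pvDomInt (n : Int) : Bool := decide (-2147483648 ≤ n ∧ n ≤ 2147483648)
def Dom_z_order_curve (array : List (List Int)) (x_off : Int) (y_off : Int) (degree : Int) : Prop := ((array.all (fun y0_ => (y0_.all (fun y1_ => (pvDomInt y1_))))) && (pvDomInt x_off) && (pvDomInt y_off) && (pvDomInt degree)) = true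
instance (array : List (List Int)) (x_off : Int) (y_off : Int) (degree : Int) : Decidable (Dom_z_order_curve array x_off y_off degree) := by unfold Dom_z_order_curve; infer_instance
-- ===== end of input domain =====

-- B replaces A's recursive four-quadrant descent by an iterative level-by-level
-- expansion of the list of leaf coordinates followed by a single join (alternative
-- decomposition, same cost); equivalence proved on degree ≥ 1 with offsets on or
-- above the grid.


-- ===== PORT A =====
-- the leaf code `str(array[y][x]) if len(array) > y and len(array[y]) > x else '0'`
-- (identical lines in both Pythons); `none` marks where the Python raises IndexError (outside Pre_)
def pvCell (array : List (List Int)) (x : Int) (y : Int) : String :=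
  if (array.length : Int) > y then
    match PySem.List.pyGet? array y with
    | none => ""        -- IndexError in Python (y < -len); unreachable under Pre_
    | some row =>
      if (row.length : Int) > x then
        match PySem.List.pyGet? row x with
        | none => ""    -- IndexError in Python (x < -len(row)); unreachable under Pre_
        | some v => PySem.Int.toStr v
      else "0"
  else "0"

def z_order_curve (array : List (List Int)) (x_off : Int) (y_off : Int) (degree : Int) : String :=
  if degree = 1 then
    pvCell array x_off y_off
  else if degree ≤ 1 then ""   -- Python recurses forever here (degree ≤ 0): totality guard, outside Pre_
  else
    let move := PySem.Int.floordiv degree 2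
    z_order_curve array x_off y_off move ++
    z_order_curve array (x_off + move) y_off move ++
    z_order_curve array x_off (y_off + move) move ++
    z_order_curve array (x_off + move) (y_off + move) move
termination_by degree.toNat
decreasing_by
  all_goals
    rw [PySem.Int.floordiv_eq_ediv_of_pos (by omega : (0:Int) < 2)]; omega

-- ===== PORT B =====
-- `def halvings(d): return [] if d == 1 else [d // 2] + halvings(d // 2)`
def pvHalvings (d : Int) : List Int :=
  if d = 1 then []
  else if d < 1 then []   -- Python recurses forever here: totality guard, outside Pre_
  else PySem.Int.floordiv d 2 :: pvHalvings (PySem.Int.floordiv d 2)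
termination_by d.toNat
decreasing_by
  rw [PySem.Int.floordiv_eq_ediv_of_pos (by omega : (0:Int) < 2)]; omega

-- `cells = [(x+dx, y+dy) for (x,y) in cells for (dx,dy) in ((0,0),(m,0),(0,m),(m,m))]`
def pvExpand (m : Int) (p : Int × Int) : List (Int × Int) :=
  [(0, 0), (m, 0), (0, m), (m, m)].map (fun q => (p.1 + q.1, p.2 + q.2))

def z_order_curve_alt (array : List (List Int)) (x_off : Int) (y_off : Int) (degree : Int) : String :=
  let cells := (pvHalvings degree).foldl
    (fun (cells : List (Int × Int)) m => cells.flatMap (pvExpand m))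
    [(x_off, y_off)]
  PySem.Str.join "" (cells.map (fun p => pvCell array p.1 p.2))

-- ===== PRECONDITION & SPEC =====
-- Pre_ requires degree ≥ 1 (for degree ≤ 0 the Python A recurses forever: RecursionError)
-- and excludes offsets so far below the grid that some visited leaf indexes past the
-- negative end of a list and raises IndexError: y_off below -len(array), or — unless
-- y_off ≥ len(array), where no row is ever touched — an x_off below -len(r) for some row
-- r (a per-row bound, so a conservative carve-out: a few inputs whose visited rows are
-- all long enough still return, with Python's wraparound, and there A = B as well).
def Pre_z_order_curve (array : List (List Int)) (x_off : Int) (y_off : Int) (degree : Int) : Prop :=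
  1 ≤ degree ∧ ((array.length : Int) ≤ y_off ∨
    (-(array.length : Int) ≤ y_off ∧ ∀ r ∈ array, -(r.length : Int) ≤ x_off))
instance (array : List (List Int)) (x_off : Int) (y_off : Int) (degree : Int) : Decidable (Pre_z_order_curve array x_off y_off degree) := by unfold Pre_z_order_curve; infer_instance

def pvWitness_z_order_curve : List (List Int) × Int × Int × Int := ([[1, 0], [0, 1]], 0, 0, 2)

def Spec_z_order_curve (array : List (List Int)) (x_off : Int) (y_off : Int) (degree : Int) (out : String) : Prop := out = z_order_curve_alt array x_off y_off degree
instance (array : List (List Int)) (x_off : Int) (y_off : Int) (degree : Int) (out : String) : Decidable (Spec_z_order_curve array x_off y_off degree out) := by unfold Spec_z_order_curve; infer_instance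

-- ===== CLAIM (what is proved, stated in full; the proofs are below) =====
def Claim_equal_z_order_curve : Prop := ∀ (array : List (List Int)) (x_off : Int) (y_off : Int) (degree : Int), Dom_z_order_curve array x_off y_off degree → Pre_z_order_curve array x_off y_off degree → Spec_z_order_curve array x_off y_off degree (z_order_curve array x_off y_off degree)

-- ===== LEMMAS AND PROOFS =====

-- recursive form of the whole output, mirroring A's quadrant order
def pvF (array : List (List Int)) (x y : Int) : List Int → String
  | [] => pvCell array x y
  | m :: ms =>
    pvF array x y ms ++ pvF array (x + m) y ms ++
    pvF array x (y + m) ms ++ pvF array (x + m) (y + m) ms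

theorem pvCharsJoin_nil (l : List (List Char)) : PySem.Chars.join [] l = l.flatten := by
  show [].intercalate l = l.flatten
  induction l with
  | nil => simp [List.intercalate]
  | cons a t ih =>
    cases t with
    | nil => simp [List.intercalate]
    | cons b u =>
      simp only [List.intercalate] at *
      simp [List.intersperse] at *
      simp [ih]

theorem pvJoin_append (l1 l2 : List String) :
    PySem.Str.join "" (l1 ++ l2) = PySem.Str.join "" l1 ++ PySem.Str.join "" l2 := by
  rw [← String.toList_inj]
  simp [PySem.Str.toList_join, String.toList_append]
  simp [pvCharsJoin_nil]

theorem pvJoin_singleton (s : String) : PySem.Str.join "" [s] = s := by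
  rw [← String.toList_inj]
  simp [PySem.Str.toList_join]

theorem pvJoin_cons (s : String) (l : List String) :
    PySem.Str.join "" (s :: l) = s ++ PySem.Str.join "" l := by
  rw [show s :: l = [s] ++ l from rfl, pvJoin_append, pvJoin_singleton]

theorem pvJoin_flatMap {α : Type} (g : α → List String) (l : List α) :
    PySem.Str.join "" (l.flatMap g)
      = PySem.Str.join "" (l.map (fun a => PySem.Str.join "" (g a))) := by
  induction l with
  | nil => simp
  | cons a t ih => rw [List.flatMap_cons, pvJoin_append, List.map_cons, pvJoin_cons, ih]

-- running the remaining expansion levels renders each current cell's subtree, in order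
theorem pvRun_eq (array : List (List Int)) :
    ∀ (ms : List Int) (cells : List (Int × Int)),
      PySem.Str.join ""
        ((ms.foldl (fun (cells : List (Int × Int)) m => cells.flatMap (pvExpand m)) cells).map
          (fun p => pvCell array p.1 p.2))
      = PySem.Str.join "" (cells.map (fun p => pvF array p.1 p.2 ms)) := by
  intro ms
  induction ms with
  | nil =>
    intro cells
    simp only [List.foldl_nil]
    rfl
  | cons m ms ih =>
    intro cells
    rw [List.foldl_cons, ih]
    rw [List.map_flatMap, pvJoin_flatMap]
    congr 1
    apply List.map_congr_left
    intro p _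
    simp only [pvExpand, List.map_cons, List.map_nil]
    rw [pvJoin_cons, pvJoin_cons, pvJoin_cons, pvJoin_singleton]
    show _ = pvF array p.1 p.2 (m :: ms)
    simp only [pvF]
    rw [String.append_assoc, String.append_assoc]
    simp

theorem pvB_eq_F (array : List (List Int)) (x y d : Int) :
    z_order_curve_alt array x y d = pvF array x y (pvHalvings d) := by
  unfold z_order_curve_alt
  rw [pvRun_eq array (pvHalvings d) [(x, y)]]
  simp [pvJoin_singleton]

theorem pvA_eq_F (array : List (List Int)) :
    ∀ (n : Nat) (d : Int), d.toNat ≤ n → 1 ≤ d → ∀ x y,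
      z_order_curve array x y d = pvF array x y (pvHalvings d) := by
  intro n
  induction n with
  | zero => intro d hd h1 x y; omega
  | succ n ih =>
    intro d hd h1 x y
    by_cases hone : d = 1
    · subst hone
      rw [z_order_curve, pvHalvings]
      simp [pvF]
    · have h2 : 2 ≤ d := by omega
      rw [z_order_curve, pvHalvings]
      rw [PySem.Int.floordiv_eq_ediv_of_pos (by omega : (0:Int) < 2)]
      simp only [if_neg hone, if_neg (by omega : ¬ d ≤ 1), if_neg (by omega : ¬ d < 1), pvF]
      have hrec : ∀ x' y' : Int, z_order_curve array x' y' (d / 2)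
          = pvF array x' y' (pvHalvings (d / 2)) := by
        intro x' y'
        rw [ih (d / 2) (by omega) (by omega)]
      rw [hrec, hrec, hrec, hrec]

-- ===== VERDICT (by name: the statement is the Claim_ definition above) =====
theorem z_order_curve_spec : Claim_equal_z_order_curve := by
  intro array x_off y_off degree _ hpre
  unfold Spec_z_order_curve
  rw [pvA_eq_F array degree.toNat degree le_rfl hpre.1, pvB_eq_F]
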